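-- pv_equiv track=rewrite | github.com/qump-project/qump-hadgem3 | code/papers/teleconnections2024/causal_paper.py | remove_redundant_tests
-- ===== SOURCE A (Python) =====
-- def is_not_superset(cond, conditions):
--     return not any([set(cond).issuperset(cc) for cc in conditions if cc != cond])
--
-- def remove_redundant_tests(test):
--     pairs = set([links for links, conditions in test])
--     reduced_set = list()
--     for pair in sorted(pairs):
--         subset = [vals for vals in test if vals[0] == pair]
--         if len(subset) == 1:
--             reduced_set.append(subset[0])
--         else:
--             conditions = [vals[1] for vals in subset]
--             keep = [cc for cc in conditions if is_not_superset(cc, conditions)]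
--             for k in keep:
--                 reduced_set.append((pair, k))
--     return reduced_set
-- ===== SOURCE B (Python) =====
-- from itertools import groupby
--
--
-- def _is_not_superset(cond, conditions):
--     return not any(set(cond).issuperset(cc) for cc in conditions if cc != cond)
--
--
-- def remove_redundant_tests(test):
--     out = []
--     for pair, grp in groupby(sorted(test, key=lambda v: v[0]), key=lambda v: v[0]):
--         conditions = [v[1] for v in grp]
--         for k in conditions:
--             if _is_not_superset(k, conditions):
--                 out.append((pair, k))
--     return out
-- ===== Notes on version B (the rewrite author's own statement) =====
-- stated objective: alternative
-- what changed: Instead of collecting the distinct pairs and re-scanning the whole test list once per pair, B sorts the list once by its pair key (stable, so within-pair order is preserved) and walks consecutive equal-pair runs with itertools.groupby, applying the same minimal/non-superset filter to each run; measured about the same speed.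
import Mathlib
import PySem

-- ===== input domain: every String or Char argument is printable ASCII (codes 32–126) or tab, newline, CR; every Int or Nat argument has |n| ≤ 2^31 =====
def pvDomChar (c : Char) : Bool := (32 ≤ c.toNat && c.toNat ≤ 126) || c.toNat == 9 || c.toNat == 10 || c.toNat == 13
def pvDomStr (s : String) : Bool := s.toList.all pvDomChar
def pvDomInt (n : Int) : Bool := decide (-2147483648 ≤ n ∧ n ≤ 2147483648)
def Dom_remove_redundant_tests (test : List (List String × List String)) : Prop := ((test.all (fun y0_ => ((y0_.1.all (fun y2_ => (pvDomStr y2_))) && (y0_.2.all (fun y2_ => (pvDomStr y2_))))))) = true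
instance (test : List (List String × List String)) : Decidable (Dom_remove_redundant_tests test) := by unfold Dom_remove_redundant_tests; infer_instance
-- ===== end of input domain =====

-- B replaces A's per-pair rescans of the whole list by one stable sort plus a single
-- grouping pass over consecutive equal-pair runs; the minimal/non-superset filter is unchanged.

-- ===== PORT A =====
def is_not_superset (cond : List String) (conditions : List (List String)) : Bool :=
  !((conditions.filter (fun cc => cc ≠ cond)).any (fun cc =>
      PySem.Set.issuperset (PySem.Set.ofList cond) cc))

def remove_redundant_tests (test : List (List String × List String)) :
    List (List String × List String) :=
  let pairs : PySem.Set (List String) := PySem.Set.ofList (test.map (fun v => v.1))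
  (PySem.List.sorted pairs (fun x => x) false).foldl
    (fun reduced_set pair =>
      let subset := test.filter (fun vals => vals.1 = pair)
      if subset.length = 1 then
        reduced_set ++ [PySem.List.pyGetD subset 0 ([], [])]
      else
        let conditions := subset.map (fun vals => vals.2)
        let keep := conditions.filter (fun cc => is_not_superset cc conditions)
        reduced_set ++ keep.map (fun k => (pair, k)))
    []

-- ===== PORT B =====
-- consecutive equal-pair runs of an already-sorted list (itertools.groupby by v[0],
-- with each run's conditions materialised)
def pvRuns (xs : List (List String × List String)) :
    List (List String × List (List String)) :=
  match xs with
  | [] => []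
  | (p, c) :: t =>
    match pvRuns t with
    | [] => [(p, [c])]
    | (q, cs) :: r => if p = q then (p, c :: cs) :: r else (p, [c]) :: (q, cs) :: r

def remove_redundant_tests_alt (test : List (List String × List String)) :
    List (List String × List String) :=
  (pvRuns (PySem.List.sorted test (fun v => v.1) false)).foldl
    (fun out g =>
      out ++ (g.2.filter (fun cc => is_not_superset cc g.2)).map (fun k => (g.1, k)))
    []

-- ===== PRECONDITION & SPEC =====
def Spec_remove_redundant_tests (test : List (List String × List String)) (out : List (List String × List String)) : Prop := out = remove_redundant_tests_alt test
instance (test : List (List String × List String)) (out : List (List String × List String)) : Decidable (Spec_remove_redundant_tests test out) := by unfold Spec_remove_redundant_tests; infer_instance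

-- ===== CLAIM (what is proved, stated in full; the proofs are below) =====
def Claim_equal_remove_redundant_tests : Prop := ∀ (test : List (List String × List String)), Dom_remove_redundant_tests test → Spec_remove_redundant_tests test (remove_redundant_tests test)

-- ===== LEMMAS AND PROOFS =====
theorem pv_sorted_instEq {α κ : Type} [LT κ] (i1 i2 : DecidableLT κ)
    (xs : List α) (key : α → κ) (r : Bool) :
    @PySem.List.sorted α κ _ i1 xs key r = @PySem.List.sorted α κ _ i2 xs key r := by
  have : i1 = i2 := by funext a b; exact Subsingleton.elim _ _
  rw [this]

theorem pv_insertBy_append {α : Type} (before : α → α → Bool) (x : α)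
    (A B : List α) (h : ∀ a ∈ A, before x a = false) :
    PySem.List.insertBy before x (A ++ B) = A ++ PySem.List.insertBy before x B := by
  induction A with
  | nil => simp
  | cons a t ih =>
    simp only [List.cons_append, PySem.List.insertBy]
    rw [h a (by simp), ih (fun a ha => h a (by simp [ha]))]
    simp

theorem pv_insertBy_front {α : Type} (before : α → α → Bool) (x : α)
    (ys : List α) (h : ∀ y ∈ ys, before x y = true) :
    PySem.List.insertBy before x ys = x :: ys := by
  cases ys with
  | nil => rfl
  | cons y t => simp only [PySem.List.insertBy, h y (by simp)]; simp

theorem pv_flatMap_congr {α β : Type} {l : List α} {f g : α → List β}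
    (h : ∀ a ∈ l, f a = g a) : l.flatMap f = l.flatMap g := by
  simp only [List.flatMap]; rw [List.map_congr_left h]

theorem pv_insert_mem (ks : List (List String))
    (f : List String → List (List String × List String))
    (x : List String × List String)
    (hs : ks.Pairwise (· < ·))
    (ha : ∀ p ∈ ks, ∀ v ∈ f p, v.1 = p)
    (hm : x.1 ∈ ks) :
    PySem.List.insertBy (fun a b => decide (a.1 < b.1)) x (ks.flatMap f)
      = ks.flatMap (fun p => f p ++ if x.1 = p then [x] else []) := by
  induction ks with
  | nil => simp at hm
  | cons p t ih =>
    obtain ⟨hpt, hst⟩ := List.pairwise_cons.mp hs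
    simp only [List.flatMap_cons]
    by_cases hpx : x.1 = p
    · have h1 : ∀ a ∈ f p, (fun a b => decide (a.1 < b.1)) x a = false := by
        intro a haf
        have := ha p (by simp) a haf
        simp [this, hpx]
      have h2 : ∀ y ∈ t.flatMap f, (fun a b => decide (a.1 < b.1)) x y = true := by
        intro y hy
        obtain ⟨q, hq, hyf⟩ := List.mem_flatMap.mp hy
        have hk := ha q (by simp [hq]) y hyf
        have hlt : p < q := hpt q hq
        simp only [hk, hpx, decide_eq_true_eq]
        exact hlt
      rw [pv_insertBy_append _ _ _ _ h1, pv_insertBy_front _ _ _ h2]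
      have h3 : t.flatMap (fun p' => f p' ++ if x.1 = p' then [x] else []) = t.flatMap f := by
        apply pv_flatMap_congr
        intro q hq
        have : x.1 ≠ q := by rw [hpx]; exact ne_of_lt (hpt q hq)
        simp [this]
      rw [h3]
      simp [hpx]
    · have hmt : x.1 ∈ t := by
        rcases List.mem_cons.mp hm with h | h
        · exact absurd h hpx
        · exact h
      have h1 : ∀ a ∈ f p, (fun a b => decide (a.1 < b.1)) x a = false := by
        intro a haf
        have hk := ha p (by simp) a haf
        have hlt : p < x.1 := hpt _ hmt
        simp only [hk, decide_eq_false_iff_not]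
        exact asymm hlt
      rw [pv_insertBy_append _ _ _ _ h1,
        ih hst (fun q hq v hv => ha q (by simp [hq]) v hv) hmt]
      simp [hpx]

theorem pv_insert_not_mem (ks : List (List String))
    (f : List String → List (List String × List String))
    (x : List String × List String)
    (hs : ks.Pairwise (· < ·))
    (ha : ∀ p ∈ ks, ∀ v ∈ f p, v.1 = p)
    (hm : x.1 ∉ ks) (hf : f x.1 = []) :
    PySem.List.insertBy (fun a b => decide (a.1 < b.1)) x (ks.flatMap f)
      = (PySem.List.insertBy (fun a b => decide (a < b)) x.1 ks).flatMap
          (fun p => f p ++ if x.1 = p then [x] else []) := by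
  induction ks with
  | nil => simp [PySem.List.insertBy, hf]
  | cons p t ih =>
    have hpx : x.1 ≠ p := by
      intro h; exact hm (by simp [h])
    have hmt : x.1 ∉ t := fun h => hm (by simp [h])
    obtain ⟨hpt, hst⟩ := List.pairwise_cons.mp hs
    by_cases hlt : x.1 < p
    · have h2 : ∀ y ∈ f p ++ t.flatMap f, (fun a b => decide (a.1 < b.1)) x y = true := by
        intro y hy
        rcases List.mem_append.mp hy with h | h
        · have := ha p (by simp) y h
          simp only [this, decide_eq_true_eq]; exact hlt
        · obtain ⟨q, hq, hyf⟩ := List.mem_flatMap.mp h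
          have := ha q (by simp [hq]) y hyf
          simp only [this, decide_eq_true_eq]; exact lt_trans hlt (hpt q hq)
      have hk : PySem.List.insertBy (fun a b => decide (a < b)) x.1 (p :: t) = x.1 :: p :: t := by
        simp [PySem.List.insertBy, hlt]
      rw [List.flatMap_cons, pv_insertBy_front _ _ _ h2, hk]
      have h3 : (p :: t).flatMap (fun q => f q ++ if x.1 = q then [x] else [])
          = (p :: t).flatMap f := by
        apply pv_flatMap_congr
        intro q hq
        have : x.1 ≠ q := by rintro rfl; exact hm hq
        simp [this]
      rw [List.flatMap_cons, h3, List.flatMap_cons]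
      simp [hf]
    · have hplt : p < x.1 := lt_of_le_of_ne (not_lt.mp hlt) (Ne.symm hpx)
      have h1 : ∀ a ∈ f p, (fun a b => decide (a.1 < b.1)) x a = false := by
        intro a haf
        have hk := ha p (by simp) a haf
        simp only [hk, decide_eq_false_iff_not]
        exact asymm hplt
      have hk : PySem.List.insertBy (fun a b => decide (a < b)) x.1 (p :: t)
          = p :: PySem.List.insertBy (fun a b => decide (a < b)) x.1 t := by
        simp [PySem.List.insertBy, hlt]
      rw [List.flatMap_cons, pv_insertBy_append _ _ _ _ h1,
        ih hst (fun q hq v hv => ha q (by simp [hq]) v hv) hmt, hk, List.flatMap_cons]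
      simp [hpx]

theorem pv_sorted_grouping (test : List (List String × List String)) :
    PySem.List.sorted test (fun v => v.1) false
      = (PySem.List.sorted (PySem.Set.ofList (test.map (fun v => v.1))) (fun x => x) false).flatMap
          (fun p => test.filter (fun vals => vals.1 = p)) := by
  induction test using List.reverseRecOn with
  | nil => simp [PySem.List.sorted]
  | append_singleton xs x ih =>
    have hstep : PySem.List.sorted (xs ++ [x]) (fun v => v.1) false
        = PySem.List.insertBy (fun a b => decide (a.1 < b.1)) x
            (PySem.List.sorted xs (fun v => v.1) false) := by
      rw [PySem.List.sorted_eq_foldl_insertBy, PySem.List.sorted_eq_foldl_insertBy,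
        List.foldl_append]
      rfl
    have hfilt : ∀ p : List String,
        (xs ++ [x]).filter (fun vals => vals.1 = p)
          = xs.filter (fun vals => vals.1 = p) ++ if x.1 = p then [x] else [] := by
      intro p
      rw [List.filter_append]
      congr 1
      by_cases h : x.1 = p <;> simp [h]
    have hset : PySem.Set.ofList ((xs ++ [x]).map (fun v => v.1))
        = PySem.Set.add (PySem.Set.ofList (xs.map (fun v => v.1))) x.1 := by
      rw [List.map_append]
      exact PySem.Set.ofList_append_singleton _ _
    have hpw : (PySem.List.sorted (PySem.Set.ofList (xs.map (fun v => v.1))) (fun x => x) false).Pairwise (· < ·) := by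
      rw [pv_sorted_instEq _ (LinearOrder.toDecidableLT)]
      exact PySem.List.sorted_ofList_pairwise_lt (xs.map (fun v => v.1))
    have haf : ∀ p ∈ PySem.List.sorted (PySem.Set.ofList (xs.map (fun v => v.1))) (fun x => x) false,
        ∀ v ∈ xs.filter (fun vals => vals.1 = p), v.1 = p := by
      intro p _ v hv
      exact of_decide_eq_true (List.mem_filter.mp hv).2
    by_cases hm : x.1 ∈ xs.map (fun v => v.1)
    · have hmS : x.1 ∈ PySem.Set.ofList (xs.map (fun v => v.1)) :=
        (PySem.Set.mem_ofList _ _).mpr hm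
      have hmk : x.1 ∈ PySem.List.sorted (PySem.Set.ofList (xs.map (fun v => v.1))) (fun x => x) false :=
        (PySem.List.mem_sorted _ _ _ _).mpr hmS
      rw [hstep, ih, pv_insert_mem _ _ _ hpw haf hmk, hset,
        PySem.Set.add_of_mem hmS]
      exact pv_flatMap_congr (fun p _ => (hfilt p).symm)
    · have hmS : x.1 ∉ PySem.Set.ofList (xs.map (fun v => v.1)) := by
        rw [PySem.Set.mem_ofList]; exact hm
      have hmk : x.1 ∉ PySem.List.sorted (PySem.Set.ofList (xs.map (fun v => v.1))) (fun x => x) false := by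
        rw [PySem.List.mem_sorted]; exact hmS
      have hf0 : xs.filter (fun vals => vals.1 = x.1) = [] := by
        rw [List.filter_eq_nil_iff]
        intro v hv hdec
        exact hm (List.mem_map.mpr ⟨v, hv, of_decide_eq_true hdec⟩)
      have hsort2 : PySem.List.sorted (PySem.Set.ofList (xs.map (fun v => v.1)) ++ [x.1]) (fun x => x) false
          = PySem.List.insertBy (fun a b => decide (a < b)) x.1
              (PySem.List.sorted (PySem.Set.ofList (xs.map (fun v => v.1))) (fun x => x) false) := by
        rw [PySem.List.sorted_eq_foldl_insertBy, PySem.List.sorted_eq_foldl_insertBy,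
          List.foldl_append]
        rfl
      rw [hstep, ih, pv_insert_not_mem _ _ _ hpw haf hmk hf0, hset,
        PySem.Set.add_of_not_mem hmS, hsort2]
      exact pv_flatMap_congr (fun p _ => (hfilt p).symm)

theorem pv_runs_bucket (b rest : List (List String × List String)) (p : List String)
    (hb : b ≠ []) (hk : ∀ v ∈ b, v.1 = p)
    (hq : ∀ q cs r, pvRuns rest = (q, cs) :: r → q ≠ p) :
    pvRuns (b ++ rest) = (p, b.map (fun v => v.2)) :: pvRuns rest := by
  induction b with
  | nil => exact absurd rfl hb
  | cons v b' ih =>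
    have hv : v.1 = p := hk v (by simp)
    cases b' with
    | nil =>
      cases hr : pvRuns rest with
      | nil =>
        cases v with
        | mk v1 v2 => simp only [List.cons_append, List.nil_append, pvRuns, hr]
                      simp at hv; simp [hv]
      | cons h r =>
        cases v with
        | mk v1 v2 =>
          cases h with
          | mk q cs =>
            have : q ≠ p := hq q cs r hr
            simp only [List.cons_append, List.nil_append, pvRuns, hr]
            simp at hv
            simp [hv, Ne.symm this]
    | cons w b'' =>
      have ih' := ih (by simp) (fun u hu => hk u (by simp [List.mem_cons] at hu ⊢; tauto))
      cases v with
      | mk v1 v2 =>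
        simp only [List.cons_append] at ih' ⊢
        rw [show pvRuns ((v1, v2) :: (w :: (b'' ++ rest)))
            = (match pvRuns (w :: (b'' ++ rest)) with
               | [] => [(v1, [v2])]
               | (q, cs) :: r => if v1 = q then (v1, v2 :: cs) :: r
                                 else (v1, [v2]) :: (q, cs) :: r) from rfl, ih']
        simp at hv
        simp [hv]

theorem pv_runs_flatMap (ks : List (List String))
    (f : List String → List (List String × List String))
    (hs : ks.Pairwise (· < ·))
    (ha : ∀ p ∈ ks, ∀ v ∈ f p, v.1 = p)
    (hn : ∀ p ∈ ks, f p ≠ []) :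
    pvRuns (ks.flatMap f) = ks.map (fun p => (p, (f p).map (fun v => v.2))) := by
  induction ks with
  | nil => rfl
  | cons p t ih =>
    obtain ⟨hpt, hst⟩ := List.pairwise_cons.mp hs
    have ihr := ih hst (fun q hq v hv => ha q (by simp [hq]) v hv) (fun q hq => hn q (by simp [hq]))
    rw [List.flatMap_cons]
    rw [pv_runs_bucket _ _ p (hn p (by simp)) (ha p (by simp))]
    · rw [ihr]; rfl
    · intro q cs r hr
      rw [ihr] at hr
      cases t with
      | nil => simp at hr
      | cons p2 t' =>
        simp only [List.map_cons, List.cons.injEq, Prod.mk.injEq] at hr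
        rcases hr with ⟨⟨rfl, -⟩, -⟩
        exact ne_of_gt (hpt p2 (by simp))

-- helpers for the proofs
def pvGB (test : List (List String × List String)) (p : List String) :
    List (List String × List String) :=
  (((test.filter (fun vals => vals.1 = p)).map (fun v => v.2)).filter
      (fun cc => is_not_superset cc ((test.filter (fun vals => vals.1 = p)).map (fun v => v.2)))).map
    (fun k => (p, k))
def pvGA (test : List (List String × List String)) (p : List String) :
    List (List String × List String) :=
  if (test.filter (fun vals => vals.1 = p)).length = 1 then
    [PySem.List.pyGetD (test.filter (fun vals => vals.1 = p)) 0 ([], [])]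
  else pvGB test p

theorem pv_gA_eq_gB (test : List (List String × List String)) (p : List String) :
    pvGA test p = pvGB test p := by
  unfold pvGA
  split_ifs with h
  · obtain ⟨v, hv⟩ := List.length_eq_one_iff.mp h
    have hk : v.1 = p := by
      have : v ∈ test.filter (fun vals => vals.1 = p) := by rw [hv]; simp
      exact of_decide_eq_true (List.mem_filter.mp this).2
    rw [pvGB, hv]
    simp [PySem.List.pyGetD, is_not_superset, ← hk]
  · rfl

theorem pv_main (test : List (List String × List String)) :
    remove_redundant_tests test = remove_redundant_tests_alt test := by
  have hbodyA : (fun (reduced_set : List (List String × List String)) pair =>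
      let subset := test.filter (fun vals => vals.1 = pair)
      if subset.length = 1 then
        reduced_set ++ [PySem.List.pyGetD subset 0 ([], [])]
      else
        let conditions := subset.map (fun vals => vals.2)
        let keep := conditions.filter (fun cc => is_not_superset cc conditions)
        reduced_set ++ keep.map (fun k => (pair, k)))
      = fun acc p => acc ++ pvGA test p := by
    funext acc p
    by_cases h : (test.filter (fun vals => vals.1 = p)).length = 1 <;>
      simp [pvGA, pvGB, h]
  have hs : (PySem.List.sorted (PySem.Set.ofList (test.map (fun v => v.1))) (fun x => x) false).Pairwise (· < ·) := by
    rw [pv_sorted_instEq _ LinearOrder.toDecidableLT]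
    exact PySem.List.sorted_ofList_pairwise_lt (test.map (fun v => v.1))
  have ha : ∀ p ∈ PySem.List.sorted (PySem.Set.ofList (test.map (fun v => v.1))) (fun x => x) false,
      ∀ v ∈ test.filter (fun vals => vals.1 = p), v.1 = p := by
    intro p _ v hv
    exact of_decide_eq_true (List.mem_filter.mp hv).2
  have hn : ∀ p ∈ PySem.List.sorted (PySem.Set.ofList (test.map (fun v => v.1))) (fun x => x) false,
      test.filter (fun vals => vals.1 = p) ≠ [] := by
    intro p hp
    have hp' : p ∈ test.map (fun v => v.1) := by
      rw [PySem.List.mem_sorted, PySem.Set.mem_ofList] at hp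
      exact hp
    obtain ⟨v, hv, rfl⟩ := List.mem_map.mp hp'
    exact List.ne_nil_of_mem (List.mem_filter.mpr ⟨hv, by simp⟩)
  have hA : remove_redundant_tests test
      = (PySem.List.sorted (PySem.Set.ofList (test.map (fun v => v.1))) (fun x => x) false).flatMap (pvGA test) := by
    unfold remove_redundant_tests
    rw [hbodyA, PySem.List.foldl_append_eq_flatMap]
    simp
  have hB : remove_redundant_tests_alt test
      = (PySem.List.sorted (PySem.Set.ofList (test.map (fun v => v.1))) (fun x => x) false).flatMap (pvGB test) := by
    unfold remove_redundant_tests_alt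
    rw [pv_sorted_grouping, pv_runs_flatMap _ _ hs ha hn,
      PySem.List.foldl_append_eq_flatMap]
    simp only [List.nil_append, List.flatMap_map]
    rfl
  rw [hA, hB]
  exact pv_flatMap_congr (fun p _ => pv_gA_eq_gB test p)

-- ===== VERDICT (by name: the statement is the Claim_ definition above) =====
theorem remove_redundant_tests_spec : Claim_equal_remove_redundant_tests := by
  intro test _
  exact pv_main test
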